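-- pv_equiv track=rewrite | github.com/Altify-Developing/Altify-Developing-Main | Tools/TwitchAccGen/main.py | find_email_type
-- ===== SOURCE A (Python) =====
-- def find_email_type(email):
--     dot_counter = 0
--     for i in email:
--         if i == '+':
--             return 'plus'
--         if i == '.':
--             dot_counter += 1
--         if dot_counter > 1:
--             return 'dot'
-- ===== SOURCE B (Python) =====
-- def find_email_type(email):
--     p = email.find('+')
--     head = email if p == -1 else email[:p]
--     if head.count('.') > 1:
--         return 'dot'
--     if p != -1:
--         return 'plus'
--     return None
-- ===== Notes on version B (the rewrite author's own statement) =====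
-- stated objective: simpler
-- what changed: A's stateful char-by-char scan with a dot counter and early exits is replaced by three string-search primitives: locate the first plus sign, slice off the prefix before it, and compare that prefix's dot count against 1 - no explicit loop, no counter state.
import Mathlib
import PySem

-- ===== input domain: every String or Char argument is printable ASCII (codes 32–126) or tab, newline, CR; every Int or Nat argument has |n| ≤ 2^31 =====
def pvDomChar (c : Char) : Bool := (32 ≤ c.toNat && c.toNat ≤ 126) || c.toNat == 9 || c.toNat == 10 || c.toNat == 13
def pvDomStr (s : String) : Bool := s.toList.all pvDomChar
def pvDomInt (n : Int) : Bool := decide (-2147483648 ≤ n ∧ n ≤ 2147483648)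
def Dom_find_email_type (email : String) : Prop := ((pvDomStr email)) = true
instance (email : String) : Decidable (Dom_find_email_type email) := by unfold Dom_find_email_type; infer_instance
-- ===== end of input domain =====

-- B replaces A's char-by-char counting scan with string-search primitives (find the first '+',
-- count the dots in the prefix before it); same exact return value — objective: simpler.

-- ===== PORT A =====
-- A: single scan, return 'plus' at the first '+', 'dot' as soon as a second '.' is seen, else None.
def pvLoopA : List Char → Int → Option String
  | [], _ => none
  | c :: rest, dc =>
    if c = '+' then some "plus"
    else
      let dc' := if c = '.' then dc + 1 else dc
      if dc' > 1 then some "dot" else pvLoopA rest dc'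

def find_email_type (email : String) : Option String :=
  pvLoopA email.toList 0

-- ===== PORT B =====
-- B: p = email.find('+'); head = email if p == -1 else email[:p];
--    'dot' if head.count('.') > 1 else 'plus' if p != -1 else None
def find_email_type_alt (email : String) : Option String :=
  let p := PySem.Str.find email "+"
  let head := if p = -1 then email else PySem.Str.slice email none (some p)
  if PySem.Str.count head "." > 1 then some "dot"
  else if p ≠ -1 then some "plus"
  else none

-- ===== PRECONDITION & SPEC =====
def Spec_find_email_type (email : String) (out : Option String) : Prop := out = find_email_type_alt email
instance (email : String) (out : Option String) : Decidable (Spec_find_email_type email out) := by unfold Spec_find_email_type; infer_instance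

-- ===== CLAIM (what is proved, stated in full; the proofs are below) =====
def Claim_equal_find_email_type : Prop := ∀ (email : String), Dom_find_email_type email → Spec_find_email_type email (find_email_type email)

-- ===== LEMMAS AND PROOFS =====

-- common characterisation both ports are reduced to (proof helper only)
def pvSpecFn (l : List Char) : Option String :=
  match l.findIdx? (fun c => c = '+') with
  | none => if 1 < (l.count '.' : Int) then some "dot" else none
  | some i => if 1 < ((l.take i).count '.' : Int) then some "dot" else some "plus"

lemma pv_singleton_prefix (v : Char) (xs : List Char) : [v] <+: xs ↔ xs.head? = some v := by
  cases xs with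
  | nil => simp
  | cons a t =>
    constructor
    · rintro ⟨s, hs⟩; simp at hs; simp [hs.1]
    · intro h; simp at h; exact ⟨t, by simp [h]⟩

-- Chars.count on a single-char needle is List.count
lemma pv_count_go_singleton (v : Char) :
    ∀ (fuel : Nat) (l : List Char) (acc : Nat), l.length ≤ fuel →
      PySem.Chars.count.go [v] fuel l acc = acc + l.count v := by
  intro fuel
  induction fuel with
  | zero =>
    intro l acc h
    have : l = [] := List.length_eq_zero_iff.mp (Nat.le_zero.mp h)
    subst this; simp [PySem.Chars.count.go]
  | succ n ih =>
    intro l acc h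
    cases l with
    | nil => simp [PySem.Chars.count.go]
    | cons c t =>
      by_cases hc : c = v
      · subst hc
        have : [c].isPrefixOf (c :: t) = true := by simp [List.isPrefixOf]
        simp only [PySem.Chars.count.go, this, if_pos]
        rw [show List.drop [c].length (c :: t) = t by simp]
        rw [ih t (acc + 1) (by simpa using Nat.succ_le_succ_iff.mp h)]
        simp
        omega
      · have h2 : (v == c) = false := beq_eq_false_iff_ne.mpr (fun h' => hc h'.symm)
        have h1 : (c == v) = false := beq_eq_false_iff_ne.mpr hc
        have hpre : [v].isPrefixOf (c :: t) = false := by simp [List.isPrefixOf, h2]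
        simp only [PySem.Chars.count.go, hpre]
        simp only [Bool.false_eq_true, if_false]
        rw [ih t acc (by simpa using Nat.succ_le_succ_iff.mp h)]
        simp [List.count_cons, h1]

lemma pv_count_singleton (l : List Char) (v : Char) :
    PySem.Chars.count l [v] = l.count v := by
  simp only [PySem.Chars.count, List.isEmpty_cons, Bool.false_eq_true, if_false]
  simpa using pv_count_go_singleton v l.length l 0 le_rfl

-- Chars.find on a single-char needle is findIdx?
lemma pv_find_singleton (l : List Char) (v : Char) :
    PySem.Chars.find l [v] =
      (match l.findIdx? (fun c => c = v) with
       | none => (-1 : Int) | some i => (i : Int)) := by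
  cases hf : l.findIdx? (fun c => c = v) with
  | none =>
    have hnm : v ∉ l := by
      intro hm
      have := List.findIdx?_eq_none_iff.mp hf v hm
      simp at this
    have hni : ¬ ([v] <:+: l) := fun hinf => hnm (hinf.subset (by simp))
    simpa using (PySem.Chars.find_eq_neg_one_iff l [v]).mpr hni
  | some i =>
    obtain ⟨hlt, hpi, hmin⟩ := List.findIdx?_eq_some_iff_getElem.mp hf
    have hiv : l[i] = v := by simpa using hpi
    have hmem : v ∈ l := hiv ▸ List.getElem_mem hlt
    have hinf : [v] <:+: l := by
      rcases List.mem_iff_append.mp hmem with ⟨s, t, rfl⟩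
      exact ⟨s, t, by simp⟩
    have hnn : 0 ≤ PySem.Chars.find l [v] := (PySem.Chars.find_nonneg_iff l [v]).mpr hinf
    obtain ⟨hpre, hfirst⟩ := PySem.Chars.find_spec hnn
    set k := (PySem.Chars.find l [v]).toNat with hk
    have hkv : l[k]? = some v := by
      rw [← List.head?_drop]; exact (pv_singleton_prefix v _).mp hpre
    obtain ⟨hkl, hkval⟩ := List.getElem?_eq_some_iff.mp hkv
    have hki : k = i := by
      rcases Nat.lt_trichotomy k i with hlt' | heq | hgt
      · exact absurd (by simpa using hkval) (by simpa using hmin k hlt')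
      · exact heq
      · exfalso
        apply hfirst i hgt
        rw [pv_singleton_prefix, List.head?_drop]
        simp [List.getElem?_eq_getElem hlt, hiv]
    have : PySem.Chars.find l [v] = (k : Int) := (Int.toNat_of_nonneg hnn).symm
    simp [this, hki]

-- A's loop computes pvSpecFn (invariant over the dot counter)
lemma pv_loopA_spec : ∀ (l : List Char) (dc : Int), dc = 0 ∨ dc = 1 →
    pvLoopA l dc =
      (match l.findIdx? (fun c => c = '+') with
       | none => if 1 < dc + (l.count '.' : Int) then some "dot" else none
       | some i => if 1 < dc + ((l.take i).count '.' : Int) then some "dot" else some "plus") := by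
  intro l
  induction l with
  | nil =>
    intro dc hdc
    simp [pvLoopA]
    omega
  | cons c rest ih =>
    intro dc hdc
    by_cases hp : c = '+'
    · subst hp
      simp [pvLoopA, List.findIdx?_cons]
      omega
    · by_cases hd : c = '.'
      · subst hd
        have hne : ('.' : Char) ≠ '+' := by decide
        rcases hdc with rfl | rfl
        · -- counter 0 → 1, keep scanning
          simp only [pvLoopA, if_neg hne]
          norm_num
          rw [ih 1 (Or.inr rfl)]
          cases hf : rest.findIdx? (fun c => c = '+') with
          | none =>
            simp [List.findIdx?_cons, hne, hf]
          | some i =>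
            simp [List.findIdx?_cons, hne, hf]
        · -- counter 1 → 2 : 'dot' now; spec side: the '.' head makes every count ≥ 1
          simp only [pvLoopA, if_neg hne]
          norm_num
          cases hf : rest.findIdx? (fun c => c = '+') with
          | none =>
            simp [List.findIdx?_cons, hne, hf]
          | some i =>
            simp [List.findIdx?_cons, hne, hf]
      · -- ordinary character: state unchanged
        simp only [pvLoopA, if_neg hp, if_neg hd]
        have hcond : ¬ (dc > 1) := by omega
        rw [if_neg hcond, ih dc hdc]
        cases hf : rest.findIdx? (fun c => c = '+') with
        | none => simp [List.findIdx?_cons, hp, hf, hd]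
        | some i => simp [List.findIdx?_cons, hp, hf, hd]

-- B computes pvSpecFn too
lemma pv_alt_spec (email : String) : find_email_type_alt email = pvSpecFn email.toList := by
  cases hf : email.toList.findIdx? (fun c => c = '+') with
  | none =>
    have hp : PySem.Chars.find email.toList ['+'] = -1 := by rw [pv_find_singleton, hf]
    simp [find_email_type_alt, pvSpecFn, hf, hp, pv_count_singleton,
      show ("+" : String).toList = ['+'] from rfl, show ("." : String).toList = ['.'] from rfl]
  | some i =>
    have hp : PySem.Chars.find email.toList ['+'] = (i : Int) := by rw [pv_find_singleton, hf]
    have hne : (i : Int) ≠ -1 := by omega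
    have hsl : PySem.List.slice email.toList none (some (i : Int)) = email.toList.take i := by
      rw [PySem.List.slice_to _ (by positivity)]; simp
    simp [find_email_type_alt, pvSpecFn, hf, hp, hne, hsl, pv_count_singleton,
      show ("+" : String).toList = ['+'] from rfl, show ("." : String).toList = ['.'] from rfl]

-- ===== VERDICT (by name: the statement is the Claim_ definition above) =====
theorem find_email_type_spec : Claim_equal_find_email_type := by
  intro email _
  unfold Spec_find_email_type
  rw [pv_alt_spec]
  unfold find_email_type pvSpecFn
  rw [pv_loopA_spec email.toList 0 (Or.inl rfl)]
  cases hf : email.toList.findIdx? (fun c => c = '+') with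
  | none => simp
  | some i => simp
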